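-- pv_equiv track=rewrite | github.com/Starshine-zyj/quaternary-genetic-system | gui_app_v2.py | _parse_dna
-- ===== SOURCE A (Python) =====
-- def _parse_dna(text):
--     """解析DNA序列"""
--     clean = []
--     for line in text.split('\n'):
--         line = line.strip()
--         # 跳过注释和空行
--         if not line or line.startswith('#') or line.startswith('//'):
--             continue
--         # 提取ATCG和0123
--         for c in line.upper():
--             if c in 'ATCG0123':
--                 clean.append(c)
--     return ''.join(clean)
-- ===== SOURCE B (Python) =====
-- def _parse_dna(text):
--     """解析DNA序列"""
--     # One-pass character state machine over the raw text: per line, skip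
--     # leading whitespace, detect '#'/'//' comments, otherwise emit kept chars.
--     LINESTART, SLASH, COMMENT, BODY = 0, 1, 2, 3
--     out = []
--     state = LINESTART
--     for c in text:
--         if c == '\n':
--             state = LINESTART
--         elif state == COMMENT:
--             pass
--         elif state == BODY:
--             u = c.upper()
--             if u in 'ATCG0123':
--                 out.append(u)
--         elif state == SLASH:
--             if c == '/':
--                 state = COMMENT
--             else:
--                 state = BODY
--                 u = c.upper()
--                 if u in 'ATCG0123':
--                     out.append(u)
--         else:  # LINESTART
--             if c.isspace():
--                 pass
--             elif c == '#':
--                 state = COMMENT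
--             elif c == '/':
--                 state = SLASH
--             else:
--                 state = BODY
--                 u = c.upper()
--                 if u in 'ATCG0123':
--                     out.append(u)
--     return ''.join(out)
-- ===== Notes on version B (the rewrite author's own statement) =====
-- stated objective: alternative
-- what changed: Replaces A's two-level structure (split text into lines, strip each, then an inner per-line character loop) by a single character-level state machine over the raw text that tracks line-start/slash/comment/body states, never materializing lines.
import Mathlib
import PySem

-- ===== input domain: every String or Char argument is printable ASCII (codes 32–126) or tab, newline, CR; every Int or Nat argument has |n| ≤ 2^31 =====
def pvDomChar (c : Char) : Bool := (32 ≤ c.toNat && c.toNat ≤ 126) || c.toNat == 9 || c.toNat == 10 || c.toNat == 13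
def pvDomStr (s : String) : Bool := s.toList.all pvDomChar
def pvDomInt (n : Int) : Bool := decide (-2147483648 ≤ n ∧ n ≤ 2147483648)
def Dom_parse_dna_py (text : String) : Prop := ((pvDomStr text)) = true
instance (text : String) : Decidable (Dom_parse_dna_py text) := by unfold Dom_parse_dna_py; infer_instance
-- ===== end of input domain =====

-- B replaces A's split('\n')/strip/per-line nested loops by a single character-level
-- state machine over the raw text (alternative decomposition, same cost).

-- the membership test `c in 'ATCG0123'` (shared by both ports)
def pvKeep (c : Char) : Bool := ("ATCG0123".toList).contains c

-- ===== PORT A =====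
-- literal transliteration of A's loop body over one raw line …
def pvLineA (acc : List Char) (rawline : List Char) : List Char :=
  let line := PySem.Chars.strip rawline
  if line.isEmpty || PySem.Chars.startswith line ['#'] || PySem.Chars.startswith line ['/', '/'] then
    acc
  else
    (PySem.Chars.upper line).foldl (fun acc c => if pvKeep c then acc ++ [c] else acc) acc

-- … and A's outer loop over text.split('\n')
def parse_dna_py (text : String) : String :=
  String.mk ((PySem.Chars.splitOn text.toList ['\n']).foldl pvLineA [])

-- ===== PORT B =====
-- literal transliteration of B's loop body: states 0 = LINESTART, 1 = SLASH, 2 = COMMENT, 3 = BODY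
def pvStep (st : Nat × List Char) (c : Char) : Nat × List Char :=
  if c = '\n' then (0, st.2)
  else if st.1 = 2 then (2, st.2)
  else if st.1 = 3 then
    let u := PySem.Chars.upperChar c
    if pvKeep u then (3, st.2 ++ [u]) else (3, st.2)
  else if st.1 = 1 then
    if c = '/' then (2, st.2)
    else
      let u := PySem.Chars.upperChar c
      if pvKeep u then (3, st.2 ++ [u]) else (3, st.2)
  else
    if PySem.Chars.isspace c then (0, st.2)
    else if c = '#' then (2, st.2)
    else if c = '/' then (1, st.2)
    else
      let u := PySem.Chars.upperChar c
      if pvKeep u then (3, st.2 ++ [u]) else (3, st.2)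

-- … and B's loop over the raw characters
def parse_dna_py_alt (text : String) : String :=
  String.mk (text.toList.foldl pvStep (0, [])).2

-- ===== PRECONDITION & SPEC =====
def Spec_parse_dna_py (text : String) (out : String) : Prop := out = parse_dna_py_alt text
instance (text : String) (out : String) : Decidable (Spec_parse_dna_py text out) := by unfold Spec_parse_dna_py; infer_instance

-- ===== CLAIM (what is proved, stated in full; the proofs are below) =====
def Claim_equal_parse_dna_py : Prop := ∀ (text : String), Dom_parse_dna_py text → Spec_parse_dna_py text (parse_dna_py text)

-- ===== LEMMAS AND PROOFS =====

lemma step_nl (st : Nat × List Char) : pvStep st '\n' = (0, st.2) := by simp [pvStep]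

lemma step2 (c : Char) (acc : List Char) (h : ¬ c = '\n') : pvStep (2, acc) c = (2, acc) := by
  simp [pvStep, h]

lemma step3 (c : Char) (acc : List Char) (h : ¬ c = '\n') :
    pvStep (3, acc) c = (3, acc ++ if pvKeep (PySem.Chars.upperChar c) then [PySem.Chars.upperChar c] else []) := by
  simp only [pvStep, if_neg h]
  norm_num
  split_ifs <;> simp

lemma step1 (c : Char) (acc : List Char) (h : ¬ c = '\n') :
    pvStep (1, acc) c = if c = '/' then (2, acc)
      else (3, acc ++ if pvKeep (PySem.Chars.upperChar c) then [PySem.Chars.upperChar c] else []) := by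
  simp only [pvStep, if_neg h]
  norm_num
  split_ifs <;> simp

lemma step0 (c : Char) (acc : List Char) (h : ¬ c = '\n') :
    pvStep (0, acc) c =
      if PySem.Chars.isspace c then (0, acc)
      else if c = '#' then (2, acc)
      else if c = '/' then (1, acc)
      else (3, acc ++ if pvKeep (PySem.Chars.upperChar c) then [PySem.Chars.upperChar c] else []) := by
  simp only [pvStep, if_neg h]
  norm_num
  split_ifs <;> simp

lemma L2' (l : List Char) (acc : List Char) (h : '\n' ∉ l) :
    l.foldl pvStep (2, acc) = (2, acc) := by
  induction l generalizing acc with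
  | nil => rfl
  | cons c t ih =>
    simp only [List.mem_cons, not_or] at h
    rw [List.foldl_cons, step2 c acc (fun hc => h.1 hc.symm)]
    exact ih acc h.2

lemma L3' (l : List Char) (acc : List Char) (h : '\n' ∉ l) :
    l.foldl pvStep (3, acc) = (3, acc ++ (PySem.Chars.upper l).filter pvKeep) := by
  induction l generalizing acc with
  | nil => simp [PySem.Chars.upper]
  | cons c t ih =>
    simp only [List.mem_cons, not_or] at h
    rw [List.foldl_cons, step3 c acc (fun hc => h.1 hc.symm), ih _ h.2]
    simp only [PySem.Chars.upper, List.map_cons, List.filter_cons]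
    split_ifs <;> simp

lemma L1' (l : List Char) (acc : List Char) (h : '\n' ∉ l) :
    (l.foldl pvStep (1, acc)).2 =
      if PySem.Chars.startswith l ['/'] then acc
      else acc ++ (PySem.Chars.upper l).filter pvKeep := by
  cases l with
  | nil => simp [PySem.Chars.startswith, List.isPrefixOf, PySem.Chars.upper]
  | cons c t =>
    simp only [List.mem_cons, not_or] at h
    rw [List.foldl_cons, step1 c acc (fun hc => h.1 hc.symm)]
    by_cases hc : c = '/'
    · subst hc
      rw [if_pos rfl, L2' t acc h.2]
      simp [PySem.Chars.startswith, List.isPrefixOf]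
    · rw [if_neg hc, L3' t _ h.2]
      have hsw : PySem.Chars.startswith (c :: t) ['/'] = false := by
        have : ¬ ('/' = c) := fun hh => hc hh.symm
        simp only [PySem.Chars.startswith, List.isPrefixOf]
        simp [this]
      rw [hsw]
      simp only [Bool.false_eq_true, if_false, PySem.Chars.upper, List.map_cons, List.filter_cons]
      split_ifs <;> simp

lemma char_ge_a (c : Char) : ('a' ≤ c) ↔ 97 ≤ c.toNat := by
  rw [Char.le_def, UInt32.le_iff_toNat_le]; exact Iff.rfl

lemma char_le_z (c : Char) : (c ≤ 'z') ↔ c.toNat ≤ 122 := by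
  rw [Char.le_def, UInt32.le_iff_toNat_le]; exact Iff.rfl

lemma keep_space (c : Char) (h : PySem.Chars.isspace c = true) :
    pvKeep (PySem.Chars.upperChar c) = false := by
  have hsp : c.toNat = 32 ∨ (9 ≤ c.toNat ∧ c.toNat ≤ 13) ∨ (28 ≤ c.toNat ∧ c.toNat ≤ 31) ∨
      c.toNat = 133 ∨ c.toNat = 160 ∨ c.toNat = 5760 ∨ (8192 ≤ c.toNat ∧ c.toNat ≤ 8202) ∨
      c.toNat = 8232 ∨ c.toNat = 8233 ∨ c.toNat = 8239 ∨ c.toNat = 8287 ∨ c.toNat = 12288 := by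
    simp only [PySem.Chars.isspace, Bool.or_eq_true, Bool.and_eq_true, decide_eq_true_eq] at h
    tauto
  have hl : PySem.Chars.islower c = false := by
    simp only [PySem.Chars.islower, Bool.and_eq_false_iff, decide_eq_false_iff_not,
      char_ge_a, char_le_z]
    omega
  rw [PySem.Chars.upperChar, hl]
  simp only [Bool.false_eq_true, if_false]
  cases hc : pvKeep c
  · rfl
  · exfalso
    have hm : c ∈ ['A','T','C','G','0','1','2','3'] := by
      have : c ∈ "ATCG0123".toList := by simpa [pvKeep] using hc
      simpa using this
    fin_cases hm <;> simp_all

lemma L0' (l : List Char) (acc : List Char) (h : '\n' ∉ l) :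
    (l.foldl pvStep (0, acc)).2 =
      if PySem.Chars.startswith (PySem.Chars.lstrip l) ['#']
          || PySem.Chars.startswith (PySem.Chars.lstrip l) ['/', '/'] then acc
      else acc ++ (PySem.Chars.upper l).filter pvKeep := by
  induction l generalizing acc with
  | nil => simp [PySem.Chars.lstrip, PySem.Chars.startswith, List.isPrefixOf, PySem.Chars.upper]
  | cons c t ih =>
    simp only [List.mem_cons, not_or] at h
    have hne : ¬ c = '\n' := fun hc => h.1 hc.symm
    rw [List.foldl_cons, step0 c acc hne]
    by_cases hs : PySem.Chars.isspace c = true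
    · rw [if_pos hs, ih _ h.2]
      have hls : PySem.Chars.lstrip (c :: t) = PySem.Chars.lstrip t := by
        simp [PySem.Chars.lstrip, List.dropWhile_cons, hs]
      rw [hls]
      simp only [PySem.Chars.upper, List.map_cons, List.filter_cons, keep_space c hs]
      simp
    · rw [if_neg hs]
      have hls : PySem.Chars.lstrip (c :: t) = c :: t := by
        simp [PySem.Chars.lstrip, List.dropWhile_cons, hs]
      rw [hls]
      by_cases hh : c = '#'
      · subst hh
        rw [if_pos rfl, L2' t acc h.2]
        simp [PySem.Chars.startswith, List.isPrefixOf]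
      · rw [if_neg hh]
        by_cases hsl : c = '/'
        · subst hsl
          rw [if_pos rfl]
          have h1 := L1' t acc h.2
          rw [h1]
          have hA : PySem.Chars.startswith ('/' :: t) ['#'] = false := by
            simp [PySem.Chars.startswith, List.isPrefixOf]
          have hB : PySem.Chars.startswith ('/' :: t) ['/', '/'] = PySem.Chars.startswith t ['/'] := by
            simp [PySem.Chars.startswith, List.isPrefixOf]
          rw [hA, hB]
          simp only [Bool.false_or]
          split_ifs with hsw
          · rfl
          · have : pvKeep (PySem.Chars.upperChar '/') = false := by decide
            simp [PySem.Chars.upper, List.filter_cons, this]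
        · rw [if_neg hsl, L3' t _ h.2]
          have hne7 : ¬ ('#' = c) := fun hh2 => hh hh2.symm
          have hne8 : ¬ ('/' = c) := fun hh2 => hsl hh2.symm
          have hA : PySem.Chars.startswith (c :: t) ['#'] = false := by
            simp only [PySem.Chars.startswith, List.isPrefixOf]; simp [hne7]
          have hB : PySem.Chars.startswith (c :: t) ['/', '/'] = false := by
            simp only [PySem.Chars.startswith, List.isPrefixOf]; simp [hne8]
          rw [hA, hB]
          simp only [Bool.or_false, Bool.false_eq_true, if_false,
            PySem.Chars.upper, List.map_cons, List.filter_cons]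
          split_ifs <;> simp

lemma dropWhile_head_false {p : Char → Bool} : ∀ (l : List Char) (c : Char) (t : List Char),
    l.dropWhile p = c :: t → p c = false := by
  intro l
  induction l with
  | nil => intro c t hh; simp at hh
  | cons a r ih =>
    intro c t hh
    rw [List.dropWhile_cons] at hh
    split_ifs at hh with ha
    · exact ih c t hh
    · cases hh; simpa using ha

lemma rstrip_prefix (m : List Char) : PySem.Chars.rstrip m <+: m := by
  have := List.dropWhile_suffix (l := m.reverse) PySem.Chars.isspace
  unfold PySem.Chars.rstrip
  simpa using this.reverse

lemma sw_rstrip (m q : List Char) (hq : q ≠ []) (hq2 : ∀ c ∈ q, PySem.Chars.isspace c = false) :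
    PySem.Chars.startswith (PySem.Chars.rstrip m) q = PySem.Chars.startswith m q := by
  rcases hb : PySem.Chars.startswith m q with _ | _
  · rcases ha : PySem.Chars.startswith (PySem.Chars.rstrip m) q with _ | _
    · rfl
    · exfalso
      rw [PySem.Chars.startswith_iff] at ha
      have : q <+: m := ha.trans (rstrip_prefix m)
      rw [← PySem.Chars.startswith_iff] at this
      rw [hb] at this; exact Bool.false_ne_true this
  · rw [PySem.Chars.startswith_iff] at hb ⊢
    obtain ⟨r, hr⟩ := hb
    subst hr
    unfold PySem.Chars.rstrip
    rw [List.reverse_append, List.dropWhile_append]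
    split_ifs with he
    · rw [List.isEmpty_iff] at he
      obtain ⟨c, qr, hcr⟩ : ∃ c qr, q.reverse = c :: qr := by
        cases hqq : q.reverse with
        | nil => exfalso; apply hq; simpa using hqq
        | cons c qr => exact ⟨c, qr, rfl⟩
      rw [hcr, List.dropWhile_cons, if_neg]
      · rw [← hcr]
        simp
      · have : c ∈ q := by
          have : c ∈ q.reverse := by rw [hcr]; exact List.mem_cons_self
          simpa using this
        simp [hq2 c this]
    · rw [List.reverse_append, List.reverse_reverse]
      exact ⟨_, rfl⟩

lemma filter_q_strip (l : List Char) (q : Char → Bool)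
    (hq : ∀ c, PySem.Chars.isspace c = true → q c = false) :
    (PySem.Chars.strip l).filter q = l.filter q := by
  have h1 : ∀ (m : List Char), (∀ c ∈ m, PySem.Chars.isspace c = true) → m.filter q = [] := by
    intro m hm
    rw [List.filter_eq_nil_iff]
    intro c hc
    simp [hq c (hm c hc)]
  unfold PySem.Chars.strip PySem.Chars.lstrip PySem.Chars.rstrip
  set m := l.dropWhile PySem.Chars.isspace with hm
  have hl : l = l.takeWhile PySem.Chars.isspace ++ m := (List.takeWhile_append_dropWhile).symm
  have hm2 : m = (m.reverse.dropWhile PySem.Chars.isspace).reverse ++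
      (m.reverse.takeWhile PySem.Chars.isspace).reverse := by
    rw [← List.reverse_append, List.takeWhile_append_dropWhile, List.reverse_reverse]
  calc ((m.reverse.dropWhile PySem.Chars.isspace).reverse).filter q
      = ((m.reverse.dropWhile PySem.Chars.isspace).reverse).filter q ++
        ((m.reverse.takeWhile PySem.Chars.isspace).reverse).filter q := by
        rw [h1 ((m.reverse.takeWhile PySem.Chars.isspace).reverse)
          (by intro c hc; rw [List.mem_reverse] at hc; exact List.mem_takeWhile_imp hc)]
        simp
    _ = m.filter q := by rw [← List.filter_append, ← hm2]
    _ = (l.takeWhile PySem.Chars.isspace).filter q ++ m.filter q := by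
        rw [h1 (l.takeWhile PySem.Chars.isspace) (fun c hc => List.mem_takeWhile_imp hc)]
        simp
    _ = l.filter q := by rw [← List.filter_append, ← hl]

lemma strip_nil_all_space (l : List Char) (h : PySem.Chars.strip l = []) :
    ∀ c ∈ l, PySem.Chars.isspace c = true := by
  unfold PySem.Chars.strip PySem.Chars.rstrip PySem.Chars.lstrip at h
  have h2 : (l.dropWhile PySem.Chars.isspace).reverse.dropWhile PySem.Chars.isspace = [] := by
    simpa using congrArg List.reverse h
  rw [List.dropWhile_eq_nil_iff] at h2
  cases hm : l.dropWhile PySem.Chars.isspace with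
  | nil =>
    rw [List.dropWhile_eq_nil_iff] at hm
    intro c hc
    exact hm c hc
  | cons c t =>
    exfalso
    have hc : PySem.Chars.isspace c = false := dropWhile_head_false l c t hm
    have : c ∈ (l.dropWhile PySem.Chars.isspace).reverse := by rw [hm]; simp
    have := h2 c this
    rw [hc] at this; exact Bool.false_ne_true this

lemma lstrip_startswith (l : List Char) (q : List Char) (hq : q ≠ [])
    (hq2 : ∀ c ∈ q, PySem.Chars.isspace c = false) :
    PySem.Chars.startswith (PySem.Chars.strip l) q = PySem.Chars.startswith (PySem.Chars.lstrip l) q := by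
  unfold PySem.Chars.strip
  exact sw_rstrip _ q hq hq2

lemma filter_upper_strip (l : List Char) :
    (PySem.Chars.upper (PySem.Chars.strip l)).filter pvKeep = (PySem.Chars.upper l).filter pvKeep := by
  unfold PySem.Chars.upper
  rw [List.filter_map, List.filter_map]
  rw [filter_q_strip l (pvKeep ∘ PySem.Chars.upperChar) (fun c hc => keep_space c hc)]

set_option maxRecDepth 4000 in
lemma perline_eq (l acc : List Char) (h : '\n' ∉ l) :
    pvLineA acc l = (l.foldl pvStep (0, acc)).2 := by
  rw [L0' l acc h]
  unfold pvLineA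
  simp only []
  rw [PySem.List.foldl_append_if_eq_filter]
  have hq1 : (['#'] : List Char) ≠ [] := by simp
  have hq2 : ∀ c ∈ (['#'] : List Char), PySem.Chars.isspace c = false := by
    intro c hc
    simp only [List.mem_singleton] at hc
    subst hc
    simp [PySem.Chars.isspace]
  have hq3 : (['/', '/'] : List Char) ≠ [] := by simp
  have hq4 : ∀ c ∈ (['/', '/'] : List Char), PySem.Chars.isspace c = false := by
    intro c hc
    simp only [List.mem_cons, List.mem_singleton, List.not_mem_nil, or_false, or_self] at hc
    subst hc
    simp [PySem.Chars.isspace]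
  by_cases he : PySem.Chars.strip l = []
  · have hls : PySem.Chars.lstrip l = [] := by
      by_contra hne
      cases hm : PySem.Chars.lstrip l with
      | nil => exact hne hm
      | cons c t =>
        have hc : PySem.Chars.isspace c = false :=
          dropWhile_head_false l c t (by simpa [PySem.Chars.lstrip] using hm)
        have : c ∈ l := by
          have : c ∈ PySem.Chars.lstrip l := by rw [hm]; simp
          exact (List.dropWhile_suffix _).mem this
        have := strip_nil_all_space l he c this
        rw [hc] at this; exact Bool.false_ne_true this
    rw [he, hls]
    have : (PySem.Chars.upper l).filter pvKeep = [] := by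
      rw [← filter_upper_strip l, he]
      simp [PySem.Chars.upper]
    rw [this]
    simp [PySem.Chars.startswith, List.isPrefixOf]
  · have hsw1 := lstrip_startswith l ['#'] hq1 hq2
    have hsw2 := lstrip_startswith l ['/', '/'] hq3 hq4
    rw [← hsw1, ← hsw2]
    have hie : (PySem.Chars.strip l).isEmpty = false := by
      simpa [List.isEmpty_iff] using he
    rw [hie]
    simp only [Bool.false_or]
    split_ifs with hcond
    · rfl
    · rw [filter_upper_strip l]

def mySplit : List Char → List Char → List (List Char)
  | cur, [] => [cur.reverse]
  | cur, c :: rest => if c = '\n' then cur.reverse :: mySplit [] rest else mySplit (c :: cur) rest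

lemma go_eq (fuel : Nat) : ∀ (l cur : List Char) (acc : List (List Char)) (_ : l.length < fuel),
    PySem.Chars.splitOn.go ['\n'] fuel l cur acc = acc.reverse ++ mySplit cur l := by
  induction fuel with
  | zero => intro l cur acc h; omega
  | succ n ih =>
    intro l cur acc h
    cases l with
    | nil => simp [PySem.Chars.splitOn.go, mySplit]
    | cons c rest =>
      rw [PySem.Chars.splitOn.go]
      by_cases hc : c = '\n'
      · subst hc
        simp only [List.isPrefixOf]
        rw [if_pos (by simp)]
        simp only [List.length_cons] at h
        rw [ih _ _ _ (by simpa using Nat.lt_of_succ_lt_succ h)]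
        simp [mySplit]
      · rw [if_neg (by simp [List.isPrefixOf]; exact fun hh => absurd hh.symm hc)]
        simp only [List.length_cons] at h
        rw [ih _ _ _ (by omega)]
        simp [mySplit, hc]

lemma splitOn_eq (s : List Char) : PySem.Chars.splitOn s ['\n'] = mySplit [] s := by
  unfold PySem.Chars.splitOn
  rw [go_eq (s.length + 1) s [] [] (by omega)]
  simp

lemma msA (s : List Char) : ∀ (cur : List Char), '\n' ∉ s → mySplit cur s = [cur.reverse ++ s] := by
  induction s with
  | nil => intro cur _; simp [mySplit]
  | cons c t ih =>
    intro cur h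
    simp only [List.mem_cons, not_or] at h
    rw [mySplit, if_neg (fun hc => h.1 hc.symm), ih _ h.2]
    simp

lemma msB (l : List Char) : ∀ (cur r : List Char), '\n' ∉ l →
    mySplit cur (l ++ '\n' :: r) = (cur.reverse ++ l) :: mySplit [] r := by
  induction l with
  | nil => intro cur r _; simp [mySplit]
  | cons c t ih =>
    intro cur r h
    simp only [List.mem_cons, not_or] at h
    rw [List.cons_append, mySplit, if_neg (fun hc => h.1 hc.symm), ih _ _ h.2]
    simp

lemma main_aux (n : Nat) : ∀ (s acc : List Char), s.length ≤ n →
    (mySplit [] s).foldl pvLineA acc = (s.foldl pvStep (0, acc)).2 := by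
  induction n with
  | zero =>
    intro s acc h
    have : s = [] := by
      cases s with
      | nil => rfl
      | cons c t => simp at h
    subst this
    rw [msA [] [] (by simp)]
    simp only [List.foldl_cons, List.foldl_nil, List.reverse_nil, List.nil_append]
    rw [perline_eq [] acc (by simp)]
    rfl
  | succ n ih =>
    intro s acc h
    by_cases hmem : '\n' ∈ s
    · set tw := s.takeWhile (fun c => c != '\n') with htw
      set dw := s.dropWhile (fun c => c != '\n') with hdw
      have hsplit : s = tw ++ dw := (List.takeWhile_append_dropWhile).symm
      have hnotin : '\n' ∉ tw := by
        intro hin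
        have := List.mem_takeWhile_imp hin
        simp at this
      obtain ⟨t, hdwt⟩ : ∃ t, dw = '\n' :: t := by
        cases hdd : dw with
        | nil =>
          exfalso
          rw [hdd] at hsplit
          rw [List.append_nil] at hsplit
          rw [hsplit] at hmem
          exact hnotin hmem
        | cons c t =>
          have hc := dropWhile_head_false s c t (by rw [← hdw]; exact hdd)
          simp at hc
          subst hc
          exact ⟨t, rfl⟩
      have hs : s = tw ++ '\n' :: t := by rw [hsplit, hdwt]
      have hlen : t.length ≤ n := by
        have := congrArg List.length hs
        simp at this
        omega
      rw [hs, msB tw [] t hnotin]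
      simp only [List.reverse_nil, List.nil_append, List.foldl_cons]
      rw [ih t (pvLineA acc tw) hlen]
      rw [List.foldl_append, List.foldl_cons, step_nl]
      rw [perline_eq tw acc hnotin]
    · rw [msA s [] hmem]
      simp only [List.reverse_nil, List.nil_append, List.foldl_cons, List.foldl_nil]
      exact perline_eq s acc hmem

lemma main_lemma (s acc : List Char) :
    (mySplit [] s).foldl pvLineA acc = (s.foldl pvStep (0, acc)).2 :=
  main_aux s.length s acc le_rfl

-- ===== VERDICT (by name: the statement is the Claim_ definition above) =====
theorem parse_dna_py_spec : Claim_equal_parse_dna_py := by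
  intro text _
  unfold Spec_parse_dna_py parse_dna_py parse_dna_py_alt
  rw [splitOn_eq, main_lemma]
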